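-- pv_equiv track=rewrite | github.com/F5Networks/f5-ansible-bigip | ansible_collections/f5networks/f5_bigip/plugins/module_utils/compare.py | compare_key_values
-- ===== SOURCE A (Python) =====
-- def compare_key_values(want, have):
--     if want is None:
--         return None
--     if have is None:
--         return want
--     for k, v in have.items():
--         if k not in want.keys():
--             continue
--         if want[k] != have[k]:
--             return want
--     return None
-- ===== SOURCE B (Python) =====
-- def compare_key_values(want, have):
--     if want is None:
--         return None
--     if have is None:
--         return want
--     # A shared key carries differing values iff it appears (with its value) in
--     # both one-sided item-set differences: set algebra, no per-key lookups.
--     only_want = want.items() - have.items()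
--     only_have = have.items() - want.items()
--     if {k for k, _ in only_want} & {k for k, _ in only_have}:
--         return want
--     return None
-- ===== Notes on version B (the rewrite author's own statement) =====
-- stated objective: alternative
-- what changed: Replaces A's short-circuiting per-key lookup loop with pure set algebra on the item sets: take both one-sided differences of want.items() and have.items() and test whether their key sets intersect; no dict lookup or value comparison is performed.
import Mathlib
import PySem

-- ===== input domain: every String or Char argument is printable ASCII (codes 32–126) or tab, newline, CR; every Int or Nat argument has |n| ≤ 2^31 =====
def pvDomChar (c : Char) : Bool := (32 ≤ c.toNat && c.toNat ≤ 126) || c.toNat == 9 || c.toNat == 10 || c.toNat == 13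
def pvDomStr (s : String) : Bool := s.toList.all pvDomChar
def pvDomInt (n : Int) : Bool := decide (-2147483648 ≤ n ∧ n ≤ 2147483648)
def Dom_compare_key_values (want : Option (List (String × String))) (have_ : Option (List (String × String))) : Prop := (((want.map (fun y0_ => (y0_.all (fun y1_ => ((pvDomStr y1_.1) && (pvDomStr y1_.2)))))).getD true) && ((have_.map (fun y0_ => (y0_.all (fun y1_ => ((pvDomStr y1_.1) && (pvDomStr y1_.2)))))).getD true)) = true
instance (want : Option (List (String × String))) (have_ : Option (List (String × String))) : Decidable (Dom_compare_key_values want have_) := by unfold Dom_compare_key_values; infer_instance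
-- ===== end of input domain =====

-- B replaces A's per-key lookup loop with set algebra on the item sets (objective: alternative).

-- ===== PORT A =====
-- the 'for k, v in have.items(): …' loop (dicts are association lists; lookup = first match)
def cmpLoopA (w h : List (String × String)) : List (String × String) → Option (List (String × String))
  | [] => none
  | (k, _) :: rest =>
    if ¬ (PySem.Dict.mk w).contains k then cmpLoopA w h rest
    else if (PySem.Dict.mk w).get? k ≠ (PySem.Dict.mk h).get? k then some w
    else cmpLoopA w h rest

def compare_key_values (want : Option (List (String × String))) (have_ : Option (List (String × String))) : Option (List (String × String)) :=
  match want with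
  | none => none
  | some w =>
    match have_ with
    | none => some w
    | some h => cmpLoopA w h h

-- ===== PORT B =====
def compare_key_values_alt (want : Option (List (String × String))) (have_ : Option (List (String × String))) : Option (List (String × String)) :=
  match want with
  | none => none
  | some w =>
    match have_ with
    | none => some w
    | some h =>
      let only_want := PySem.Set.diff (PySem.Set.ofList (PySem.Dict.mk w).items) ((PySem.Dict.mk h).items)
      let only_have := PySem.Set.diff (PySem.Set.ofList (PySem.Dict.mk h).items) ((PySem.Dict.mk w).items)
      if PySem.Set.inter (PySem.Set.ofList (only_want.map Prod.fst)) (only_have.map Prod.fst) ≠ [] then some w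
      else none

-- ===== PRECONDITION & SPEC =====
-- Pre_ excludes association lists with duplicate keys: such a list represents no Python dict
-- (the Python arguments are dicts, whose keys are unique), so nothing is claimed there.
def Pre_compare_key_values (want : Option (List (String × String))) (have_ : Option (List (String × String))) : Prop :=
  ((want.getD []).map Prod.fst).Nodup ∧ ((have_.getD []).map Prod.fst).Nodup
instance (want : Option (List (String × String))) (have_ : Option (List (String × String))) : Decidable (Pre_compare_key_values want have_) := by unfold Pre_compare_key_values; infer_instance

def pvWitness_compare_key_values : (Option (List (String × String))) × (Option (List (String × String))) :=
  (some [("a", "1"), ("b", "2")], some [("b", "3"), ("c", "4")])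

def Spec_compare_key_values (want : Option (List (String × String))) (have_ : Option (List (String × String))) (out : Option (List (String × String))) : Prop := out = compare_key_values_alt want have_
instance (want : Option (List (String × String))) (have_ : Option (List (String × String))) (out : Option (List (String × String))) : Decidable (Spec_compare_key_values want have_ out) := by unfold Spec_compare_key_values; infer_instance

-- ===== CLAIM (what is proved, stated in full; the proofs are below) =====
def Claim_equal_compare_key_values : Prop := ∀ (want : Option (List (String × String))) (have_ : Option (List (String × String))), Dom_compare_key_values want have_ → Pre_compare_key_values want have_ → Spec_compare_key_values want have_ (compare_key_values want have_)

-- ===== LEMMAS AND PROOFS =====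

-- A's loop returns `some w` iff some key of `have` is shared and has differing values; otherwise `none`.
theorem cmpLoopA_eq_if (w h : List (String × String)) (l : List (String × String)) :
    cmpLoopA w h l =
      if l.any (fun p => (PySem.Dict.mk w).contains p.1 &&
          !((PySem.Dict.mk w).get? p.1 == (PySem.Dict.mk h).get? p.1)) then some w else none := by
  induction l with
  | nil => simp [cmpLoopA]
  | cons p rest ih =>
    obtain ⟨k, v⟩ := p
    simp only [cmpLoopA, List.any_cons]
    by_cases hc : (PySem.Dict.mk w).contains k = true
    · by_cases hne : (PySem.Dict.mk w).get? k = (PySem.Dict.mk h).get? k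
      · have hhead : ((PySem.Dict.mk w).contains k &&
            !((PySem.Dict.mk w).get? k == (PySem.Dict.mk h).get? k)) = false := by
          simp [hne]
        rw [if_neg (not_not_intro hc), if_neg (not_not_intro hne), ih]
        simp only [hhead, Bool.false_or]
      · have hhead : ((PySem.Dict.mk w).contains k &&
            !((PySem.Dict.mk w).get? k == (PySem.Dict.mk h).get? k)) = true := by
          simp [hc, hne]
        rw [if_neg (not_not_intro hc), if_pos hne]
        simp only [hhead, Bool.true_or, if_true]
    · have hhead : ((PySem.Dict.mk w).contains k &&
          !((PySem.Dict.mk w).get? k == (PySem.Dict.mk h).get? k)) = false := by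
        simp [hc]
      rw [if_pos hc, ih]
      simp only [hhead, Bool.false_or]

-- Membership of a key in one one-sided item-set difference, under unique keys.
theorem mem_diffKeys (w h : List (String × String))
    (hw : (w.map Prod.fst).Nodup) (hh : (h.map Prod.fst).Nodup) (k : String) :
    (k ∈ (PySem.Set.diff (PySem.Set.ofList (PySem.Dict.mk w).items) ((PySem.Dict.mk h).items)).map Prod.fst)
      ↔ ∃ v, (PySem.Dict.mk w).get? k = some v ∧ (PySem.Dict.mk h).get? k ≠ some v := by
  have hwmk : (PySem.Dict.mk w).keys.Nodup := by simpa [PySem.Dict.keys_mk] using hw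
  have hhmk : (PySem.Dict.mk h).keys.Nodup := by simpa [PySem.Dict.keys_mk] using hh
  constructor
  · intro hk
    obtain ⟨p, hp, hpk⟩ := List.mem_map.mp hk
    rw [PySem.Set.mem_diff] at hp
    obtain ⟨hpw, hph⟩ := hp
    rw [PySem.Set.mem_ofList] at hpw
    obtain ⟨pk, pv⟩ := p
    cases hpk
    refine ⟨pv, (PySem.Dict.get?_eq_some_iff_mem_items _ _ _ hwmk).mpr hpw, fun hsome => ?_⟩
    exact hph ((PySem.Dict.get?_eq_some_iff_mem_items _ _ _ hhmk).mp hsome)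
  · rintro ⟨v, hwv, hhv⟩
    refine List.mem_map.mpr ⟨(k, v), ?_, rfl⟩
    rw [PySem.Set.mem_diff, PySem.Set.mem_ofList]
    exact ⟨(PySem.Dict.get?_eq_some_iff_mem_items _ _ _ hwmk).mp hwv,
      fun hmem => hhv ((PySem.Dict.get?_eq_some_iff_mem_items _ _ _ hhmk).mpr hmem)⟩

-- B's key-set intersection is nonempty iff A's loop condition fires somewhere in h.
theorem badKeys_iff (w h : List (String × String))
    (hw : (w.map Prod.fst).Nodup) (hh : (h.map Prod.fst).Nodup) :
    (PySem.Set.inter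
        (PySem.Set.ofList ((PySem.Set.diff (PySem.Set.ofList (PySem.Dict.mk w).items) ((PySem.Dict.mk h).items)).map Prod.fst))
        ((PySem.Set.diff (PySem.Set.ofList (PySem.Dict.mk h).items) ((PySem.Dict.mk w).items)).map Prod.fst) ≠ [])
      ↔ (h.any (fun p => (PySem.Dict.mk w).contains p.1 &&
          !((PySem.Dict.mk w).get? p.1 == (PySem.Dict.mk h).get? p.1))) = true := by
  constructor
  · intro hne
    obtain ⟨k, hk⟩ := List.exists_mem_of_ne_nil _ hne
    rw [PySem.Set.mem_inter, PySem.Set.mem_ofList] at hk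
    obtain ⟨hkw, hkh⟩ := hk
    obtain ⟨v, hwv, hvne⟩ := (mem_diffKeys w h hw hh k).mp hkw
    obtain ⟨u, hhu, hune⟩ := (mem_diffKeys h w hh hw k).mp hkh
    obtain ⟨p, hp, hpk⟩ := List.mem_map.mp
      (PySem.Dict.mem_keys_of_mem_items _ (PySem.Dict.mem_items_of_get?_eq_some _ hhu))
    rw [List.any_eq_true]
    refine ⟨p, by simpa [PySem.Dict.keys_mk] using hp, ?_⟩
    have hcont : (PySem.Dict.mk w).contains p.1 = true := by
      rw [hpk, PySem.Dict.contains_eq_isSome_get?, hwv]; rfl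
    have hpk' : p.1 = k := hpk
    have hget : (PySem.Dict.mk w).get? p.1 ≠ (PySem.Dict.mk h).get? p.1 := by
      rw [hpk', hwv]
      exact fun hc => hvne hc.symm
    simp [hcont, hget]
  · intro hany hnil
    obtain ⟨p, hp, hcond⟩ := List.any_eq_true.mp hany
    rw [Bool.and_eq_true, Bool.not_eq_true', beq_eq_false_iff_ne] at hcond
    obtain ⟨hcont, hget⟩ := hcond
    have hws : ((PySem.Dict.mk w).get? p.1).isSome := by
      rw [← PySem.Dict.contains_eq_isSome_get?]; exact hcont
    obtain ⟨v, hwv⟩ := Option.isSome_iff_exists.mp hws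
    have hhk : (PySem.Dict.mk h).contains p.1 = true := by
      have : p.1 ∈ (PySem.Dict.mk h).keys := by
        simp only [PySem.Dict.keys_mk]; exact List.mem_map.mpr ⟨p, hp, rfl⟩
      exact (PySem.Dict.contains_iff_mem_keys _ _).mpr this
    have hhs : ((PySem.Dict.mk h).get? p.1).isSome := by
      rw [← PySem.Dict.contains_eq_isSome_get?]; exact hhk
    obtain ⟨u, hhu⟩ := Option.isSome_iff_exists.mp hhs
    have hmem : p.1 ∈ PySem.Set.inter
        (PySem.Set.ofList ((PySem.Set.diff (PySem.Set.ofList (PySem.Dict.mk w).items) ((PySem.Dict.mk h).items)).map Prod.fst))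
        ((PySem.Set.diff (PySem.Set.ofList (PySem.Dict.mk h).items) ((PySem.Dict.mk w).items)).map Prod.fst) := by
      rw [PySem.Set.mem_inter, PySem.Set.mem_ofList]
      refine ⟨(mem_diffKeys w h hw hh p.1).mpr ⟨v, hwv, ?_⟩,
              (mem_diffKeys h w hh hw p.1).mpr ⟨u, hhu, ?_⟩⟩
      · rw [hwv] at hget; exact fun hc => hget (hc ▸ hhu ▸ rfl) |>.elim
      · rw [hhu] at hget; exact fun hc => hget (by rw [hwv] at hc ⊢; exact hc)
    rw [hnil] at hmem
    exact absurd hmem (List.not_mem_nil)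

-- ===== VERDICT (by name: the statement is the Claim_ definition above) =====
theorem compare_key_values_spec : Claim_equal_compare_key_values := by
  intro want have_ _ hpre
  unfold Spec_compare_key_values compare_key_values compare_key_values_alt
  match want, have_ with
  | none, _ => rfl
  | some w, none => rfl
  | some w, some h =>
    obtain ⟨hw, hh⟩ := hpre
    simp only [Option.getD_some] at hw hh
    simp only
    rw [cmpLoopA_eq_if]
    by_cases hb : (h.any (fun p => (PySem.Dict.mk w).contains p.1 &&
        !((PySem.Dict.mk w).get? p.1 == (PySem.Dict.mk h).get? p.1))) = true
    · rw [if_pos hb, if_pos ((badKeys_iff w h hw hh).mpr hb)]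
    · rw [if_neg hb, if_neg (fun hne => hb ((badKeys_iff w h hw hh).mp hne))]
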